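-- pv_equiv track=rewrite | github.com/sqrtxander/aoc2018 | day02/part1.py | solve
-- ===== SOURCE A (Python) =====
-- from collections import Counter
--
-- def solve(s: str) -> int:
--     lines = s.splitlines()
--
--     twos = 0
--     threes = 0
--     for line in lines:
--         counts = Counter(line)
--         twos += 2 in counts.values()
--         threes += 3 in counts.values()
--     return twos * threes
-- ===== SOURCE B (Python) =====
-- def _run_lengths(cs):
--     # run lengths of a sorted char list: scan each maximal run of equal chars
--     lengths = []
--     i = 0
--     n = len(cs)
--     while i < n:
--         j = i
--         while j < n and cs[j] == cs[i]:
--             j += 1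
--         lengths.append(j - i)
--         i = j
--     return lengths
--
--
-- def solve(s: str) -> int:
--     twos = 0
--     threes = 0
--     for line in s.splitlines():
--         lengths = _run_lengths(sorted(line))
--         twos += 2 in lengths
--         threes += 3 in lengths
--     return twos * threes
-- ===== Notes on version B (the rewrite author's own statement) =====
-- stated objective: alternative
-- what changed: Per-line character frequencies are derived by sorting the line and scanning maximal runs of equal characters (sort-and-group) instead of building a Counter hash table and testing its values.
import Mathlib
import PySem

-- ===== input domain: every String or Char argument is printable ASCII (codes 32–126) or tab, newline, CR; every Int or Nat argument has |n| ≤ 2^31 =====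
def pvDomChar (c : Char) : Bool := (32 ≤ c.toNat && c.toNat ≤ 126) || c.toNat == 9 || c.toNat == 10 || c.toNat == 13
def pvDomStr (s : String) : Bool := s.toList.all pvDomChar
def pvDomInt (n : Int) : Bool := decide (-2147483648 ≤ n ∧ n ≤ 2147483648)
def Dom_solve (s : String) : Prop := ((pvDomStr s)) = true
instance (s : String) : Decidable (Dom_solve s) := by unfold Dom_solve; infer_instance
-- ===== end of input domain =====

-- B replaces the Counter hash table by sort-and-scan run lengths per line (alternative algorithm, same result).

-- ===== PORT A =====
def solve (s : String) : Int :=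
  let lines := PySem.Str.splitlines s
  let p : Int × Int := lines.foldl (fun acc line =>
    let counts := PySem.Dict.counter line.toList
    (acc.1 + (if counts.values.contains 2 then 1 else 0),
     acc.2 + (if counts.values.contains 3 then 1 else 0))) (0, 0)
  p.1 * p.2

-- ===== PORT B =====
-- run lengths of a sorted char list: each step consumes one maximal run of equal chars
def runLengths : List Char → List Int
  | [] => []
  | c :: rest =>
    ((rest.takeWhile (fun d => d == c)).length + 1 : Int) ::
      runLengths (rest.dropWhile (fun d => d == c))
termination_by l => l.length
decreasing_by
  exact Nat.lt_succ_of_le (List.length_dropWhile_le _ _)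

def solve_alt (s : String) : Int :=
  let p : Int × Int := (PySem.Str.splitlines s).foldl (fun acc line =>
    let lengths := runLengths (PySem.List.sorted line.toList (fun x => x) false)
    (acc.1 + (if lengths.contains 2 then 1 else 0),
     acc.2 + (if lengths.contains 3 then 1 else 0))) (0, 0)
  p.1 * p.2

-- ===== PRECONDITION & SPEC =====
def Spec_solve (s : String) (out : Int) : Prop := out = solve_alt s
instance (s : String) (out : Int) : Decidable (Spec_solve s out) := by unfold Spec_solve; infer_instance

-- ===== CLAIM (what is proved, stated in full; the proofs are below) =====
def Claim_equal_solve : Prop := ∀ (s : String), Dom_solve s → Spec_solve s (solve s)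

-- ===== LEMMAS AND PROOFS =====

-- membership in the run lengths of a sorted list = some char occurring exactly n times
theorem mem_runLengths (l : List Char) (h : l.Pairwise (· ≤ ·)) (n : Int) :
    n ∈ runLengths l ↔ ∃ c ∈ l, (l.count c : Int) = n := by
  induction l using runLengths.induct with
  | case1 => simp [runLengths]
  | case2 c rest ih =>
    have hsplit := List.takeWhile_append_dropWhile (p := fun d => d == c) (l := rest)
    set t := rest.takeWhile (fun d => d == c) with ht
    set d := rest.dropWhile (fun d => d == c) with hd
    have ht_eq : ∀ x ∈ t, x = c := by
      intro x hx
      have := List.mem_takeWhile_imp hx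
      simpa using this
    have hrest : rest.Pairwise (· ≤ ·) := (List.pairwise_cons.mp h).2
    have hc_le : ∀ x ∈ rest, c ≤ x := (List.pairwise_cons.mp h).1
    have hd_pw : d.Pairwise (· ≤ ·) := hrest.sublist (List.dropWhile_sublist _)
    have hc_not_d : c ∉ d := by
      cases hdd : d with
      | nil => simp
      | cons h' d' =>
        have hh'ne : ¬ (h' == c) = true := by
          have := List.head_dropWhile_not (p := fun x => x == c) (l := rest)
            (by simp [← hd, hdd])
          simpa [← hd, hdd] using this
        have hh'ne' : h' ≠ c := by simpa using hh'ne
        have hh'mem : h' ∈ rest := by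
          have : h' ∈ d := by simp [hdd]
          exact (List.dropWhile_sublist _).subset (by simpa [← hd] using this)
        have hch' : c < h' := lt_of_le_of_ne (hc_le _ hh'mem) (Ne.symm hh'ne')
        have hpw' := List.pairwise_cons.mp (by simpa [hdd] using hd_pw)
        intro hmem
        rcases (by simpa [hdd] using hmem : c = h' ∨ c ∈ d') with h1 | h1
        · exact hh'ne' h1.symm
        · exact absurd (lt_of_lt_of_le hch' (hpw'.1 c h1)) (lt_irrefl c)
    have hdx_ne : ∀ x ∈ d, x ≠ c ∧ x ∉ t := by
      intro x hx
      cases hdd : d with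
      | nil => simp [hdd] at hx
      | cons h' d' =>
        have hh'ne : ¬ (h' == c) = true := by
          have := List.head_dropWhile_not (p := fun y => y == c) (l := rest)
            (by simp [← hd, hdd])
          simpa [← hd, hdd] using this
        have hh'ne' : h' ≠ c := by simpa using hh'ne
        have hh'mem : h' ∈ rest := by
          have : h' ∈ d := by simp [hdd]
          exact (List.dropWhile_sublist _).subset (by simpa [← hd] using this)
        have hch' : c < h' := lt_of_le_of_ne (hc_le _ hh'mem) (Ne.symm hh'ne')
        have hpw' := List.pairwise_cons.mp (by simpa [hdd] using hd_pw)
        have hxgt : c < x := by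
          rcases (by simpa [hdd] using hx : x = h' ∨ x ∈ d') with h1 | h1
          · exact h1 ▸ hch'
          · exact lt_of_lt_of_le hch' (hpw'.1 x h1)
        refine ⟨ne_of_gt hxgt, fun hxt => ?_⟩
        exact absurd (ht_eq x hxt ▸ hxgt) (lt_irrefl c)
    -- counts
    have hcount_c : ((c :: rest).count c : ℕ) = t.length + 1 := by
      have h1 : rest.count c = t.count c + d.count c := by
        conv_lhs => rw [← hsplit]
        simp [List.count_append]
      have h2 : t.count c = t.length := by
        apply List.count_eq_length.mpr
        intro x hx; simpa using (ht_eq x hx).symm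
      have h3 : d.count c = 0 := List.count_eq_zero.mpr hc_not_d
      simp [h1, h2, h3]
    have hcount_d : ∀ x ∈ d, (c :: rest).count x = d.count x := by
      intro x hx
      obtain ⟨hne, hnt⟩ := hdx_ne x hx
      have h1 : rest.count x = t.count x + d.count x := by
        conv_lhs => rw [← hsplit]
        simp [List.count_append]
      have h2 : t.count x = 0 := List.count_eq_zero.mpr hnt
      have hne' : ¬ c = x := fun hh => hne hh.symm
      simp [h1, h2, hne']
    rw [runLengths]
    simp only [List.mem_cons]
    rw [ih hd_pw]
    constructor
    · rintro (rfl | ⟨x, hx, hcnt⟩)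
      · exact ⟨c, by simp, by rw [hcount_c]; push_cast; ring⟩
      · refine ⟨x, ?_, ?_⟩
        · have : x ∈ rest := (List.dropWhile_sublist _).subset (by simpa [← hd] using hx)
          simp [this]
        · rw [hcount_d x hx]; exact hcnt
    · rintro ⟨x, hx, hcnt⟩
      rcases hx with rfl | hx'
      · left; rw [hcount_c] at hcnt; rw [← ht]; push_cast at hcnt ⊢; omega
      · -- x ∈ rest = t ++ d
        have : x ∈ t ∨ x ∈ d := by
          have := hx'; rw [← hsplit] at this; simpa using this
        rcases this with hxt | hxd
        · left
          have : x = c := ht_eq x hxt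
          subst this
          rw [hcount_c] at hcnt; rw [← ht]; push_cast at hcnt ⊢; omega
        · right
          exact ⟨x, hxd, by rw [← hcount_d x hxd]; exact hcnt⟩

-- per line: Counter-values membership = run-lengths-of-sorted membership (as Bool)
theorem perLine (l : List Char) (n : Int) :
    (PySem.Dict.counter l).values.contains n
      = (runLengths (PySem.List.sorted l (fun x => x) false)).contains n := by
  have hperm : (PySem.List.sorted l (fun x => x) false).Perm l := PySem.List.sorted_perm _ _ _
  have hpw : (PySem.List.sorted l (fun x => x) false).Pairwise (· ≤ ·) := by
    simpa using PySem.List.sorted_pairwise (xs := l) (key := fun x => x)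
  have hA : (PySem.Dict.counter l).values = (PySem.Set.ofList l).map (fun k => (l.count k : Int)) := by
    have := PySem.Dict.items_counter (xs := l)
    calc (PySem.Dict.counter l).values
        = (PySem.Dict.counter l).items.map (·.2) := rfl
      _ = _ := by rw [this]; simp
  rw [hA]
  rw [Bool.eq_iff_iff]
  simp only [List.contains_iff_mem, List.mem_map]
  rw [mem_runLengths _ hpw n]
  constructor
  · rintro ⟨c, hc, hcnt⟩
    refine ⟨c, hperm.mem_iff.mpr ((PySem.Set.mem_ofList _ _).mp hc), ?_⟩
    rw [hperm.count_eq]; exact hcnt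
  · rintro ⟨c, hc, hcnt⟩
    refine ⟨c, (PySem.Set.mem_ofList _ _).mpr (hperm.mem_iff.mp hc), ?_⟩
    rw [← hperm.count_eq]; exact hcnt

-- ===== VERDICT (by name: the statement is the Claim_ definition above) =====
theorem solve_spec : Claim_equal_solve := by
  intro s _
  unfold Spec_solve solve solve_alt
  have hfun : (fun (acc : Int × Int) (line : String) =>
      let counts := PySem.Dict.counter line.toList
      ((acc.1 + (if counts.values.contains 2 then 1 else 0) : Int),
       (acc.2 + (if counts.values.contains 3 then 1 else 0) : Int)))
    = (fun (acc : Int × Int) (line : String) =>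
      let lengths := runLengths (PySem.List.sorted line.toList (fun x => x) false)
      ((acc.1 + (if lengths.contains 2 then 1 else 0) : Int),
       (acc.2 + (if lengths.contains 3 then 1 else 0) : Int))) := by
    funext acc line
    simp only [perLine]
  simp only [hfun]
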